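-- pv_equiv track=rewrite | github.com/furkanhanilci/MitigatingOverThinkingLLMs | tests/test_tokenizer.py | split_by_steps
-- ===== SOURCE A (Python) =====
-- from typing import List, Any, Dict, Union
--
-- def split_by_steps(
--     solution: str, num_step_per_chunk: int = 1
-- ) -> List[Dict[str, str]]:
--     split_token = "\n\n"
--     steps = solution.split(split_token)
--
--     split_results = []
--     for i in range(0, len(steps) + 1, num_step_per_chunk):
--         partial_solution = split_token.join(steps[:i])
--         split_results.append(partial_solution)
--     if len(steps) % num_step_per_chunk != 0:
--         # Add the last step
--         split_results.append(split_token.join(steps))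
--     return split_results
-- ===== SOURCE B (Python) =====
-- def split_by_steps(solution, num_step_per_chunk=1):
--     split_token = "\n\n"
--     steps = solution.split(split_token)
--     n = len(steps)
--     split_results = []
--     prefix = ""
--     prev = 0
--     for cut in range(0, n + 1, num_step_per_chunk):
--         for j in range(prev, cut):
--             prefix = steps[j] if j == 0 else prefix + split_token + steps[j]
--         split_results.append(prefix)
--         prev = cut
--     if n % num_step_per_chunk != 0:
--         for j in range(prev, n):
--             prefix = steps[j] if j == 0 else prefix + split_token + steps[j]
--         split_results.append(prefix)
--     return split_results
-- ===== Notes on version B (the rewrite author's own statement) =====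
-- stated objective: faster
-- what changed: Instead of recomputing split_token.join(steps[:i]) from scratch at every cut, B keeps one running prefix string, extends it chunk by chunk between consecutive cut indices, and emits the accumulator at each cut (and once more at the end when len(steps) is not a multiple of the chunk size).
-- outside the precondition, e.g. on split_by_steps('a\n\nb', 0): A raises ValueError, B raises ValueError
import Mathlib
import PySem

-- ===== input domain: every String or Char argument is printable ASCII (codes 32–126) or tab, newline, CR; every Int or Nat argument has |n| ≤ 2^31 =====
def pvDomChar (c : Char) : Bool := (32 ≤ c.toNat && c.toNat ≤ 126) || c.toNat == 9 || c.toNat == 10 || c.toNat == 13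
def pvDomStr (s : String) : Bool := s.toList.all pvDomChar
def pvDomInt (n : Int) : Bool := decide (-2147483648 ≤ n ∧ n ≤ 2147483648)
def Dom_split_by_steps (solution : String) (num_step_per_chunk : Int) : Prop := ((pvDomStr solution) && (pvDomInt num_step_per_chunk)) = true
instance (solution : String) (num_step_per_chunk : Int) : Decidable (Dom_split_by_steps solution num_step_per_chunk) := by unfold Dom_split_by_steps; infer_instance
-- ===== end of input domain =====

-- B replaces the per-cut `"\n\n".join(steps[:i])` recomputation by ONE running prefix that is
-- extended chunk by chunk and emitted at each cut; measurably faster by a constant factor.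

-- ===== PORT A =====
-- solution.split("\n\n"): the separator is the nonempty literal "\n\n", so str.split cannot raise;
-- PySem.Chars.splitOn is its exact value (PySem.Str.split? wraps exactly this for a nonempty sep).
def split_by_steps (solution : String) (num_step_per_chunk : Int) : List String :=
  let split_token := "\n\n"
  let steps : List String := (PySem.Chars.splitOn solution.toList split_token.toList).map String.ofList
  let split_results : List String :=
    (PySem.List.pyRange 0 (PySem.List.len steps + 1) num_step_per_chunk).foldl
      (fun acc i => acc ++ [PySem.Str.join split_token (PySem.List.slice steps none (some i))]) []
  if PySem.Int.mod (PySem.List.len steps) num_step_per_chunk ≠ 0 then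
    split_results ++ [PySem.Str.join split_token steps]
  else
    split_results

-- ===== PORT B =====
-- inner loop `for j in range(prev, cut): prefix = steps[j] if j == 0 else prefix + split_token + steps[j]`
def pvExtend (steps : List (List Char)) (p : List Char) (js : List Int) : List Char :=
  js.foldl (fun p j =>
    if j = 0 then PySem.List.pyGetD steps j []
    else p ++ "\n\n".toList ++ PySem.List.pyGetD steps j []) p

def split_by_steps_alt (solution : String) (num_step_per_chunk : Int) : List String :=
  let steps := PySem.Chars.splitOn solution.toList "\n\n".toList
  let n : Int := PySem.List.len steps
  -- state: (split_results, prefix, prev)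
  let st := (PySem.List.pyRange 0 (n + 1) num_step_per_chunk).foldl
      (fun (st : List (List Char) × List Char × Int) cut =>
        let p := pvExtend steps st.2.1 (PySem.List.pyRange st.2.2 cut 1)
        (st.1 ++ [p], p, cut)) ([], [], 0)
  let res := if PySem.Int.mod n num_step_per_chunk ≠ 0 then
      st.1 ++ [pvExtend steps st.2.1 (PySem.List.pyRange st.2.2 n 1)]
    else
      st.1
  res.map String.ofList

-- ===== PRECONDITION & SPEC =====
-- num_step_per_chunk = 0 makes Python's range(…, 0) raise ValueError, so it is excluded.
def Pre_split_by_steps (solution : String) (num_step_per_chunk : Int) : Prop :=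
  num_step_per_chunk ≠ 0
instance (solution : String) (num_step_per_chunk : Int) : Decidable (Pre_split_by_steps solution num_step_per_chunk) := by unfold Pre_split_by_steps; infer_instance

def pvWitness_split_by_steps : String × Int := ("one\n\ntwo\n\nthree", 2)

def Spec_split_by_steps (solution : String) (num_step_per_chunk : Int) (out : List String) : Prop := out = split_by_steps_alt solution num_step_per_chunk
instance (solution : String) (num_step_per_chunk : Int) (out : List String) : Decidable (Spec_split_by_steps solution num_step_per_chunk out) := by unfold Spec_split_by_steps; infer_instance

-- ===== CLAIM (what is proved, stated in full; the proofs are below) =====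
def Claim_equal_split_by_steps : Prop := ∀ (solution : String) (num_step_per_chunk : Int), Dom_split_by_steps solution num_step_per_chunk → Pre_split_by_steps solution num_step_per_chunk → Spec_split_by_steps solution num_step_per_chunk (split_by_steps solution num_step_per_chunk)

-- ===== LEMMAS AND PROOFS =====

-- `"\n\n".join(l ++ [y])` extends the join of a nonempty `l` by one separator and one chunk
theorem pv_join_append_singleton (tok y : List Char) :
    ∀ (l : List (List Char)), l ≠ [] →
      PySem.Chars.join tok (l ++ [y]) = PySem.Chars.join tok l ++ tok ++ y
  | [], h => absurd rfl h
  | [x], _ => by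
    simpa [PySem.Chars.join_singleton] using PySem.Chars.join_cons_cons tok x y []
  | x :: z :: l, _ => by
    have h1 : (x :: z :: l) ++ [y] = x :: (z :: (l ++ [y])) := rfl
    have h2 : z :: (l ++ [y]) = (z :: l) ++ [y] := rfl
    rw [h1, PySem.Chars.join_cons_cons, h2,
      pv_join_append_singleton tok y (z :: l) (by simp),
      PySem.Chars.join_cons_cons]
    simp [List.append_assoc]

-- peeling the last index off B's inner loop
theorem pvExtend_append (steps : List (List Char)) (p : List Char) (js : List Int) (j : Int) :
    pvExtend steps p (js ++ [j]) =
      if j = 0 then PySem.List.pyGetD steps j []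
      else pvExtend steps p js ++ "\n\n".toList ++ PySem.List.pyGetD steps j [] := by
  unfold pvExtend
  rw [List.foldl_append]
  rfl

-- the running prefix, extended over range(a, b), turns join(steps[:a]) into join(steps[:b])
theorem pv_extend_spec (steps : List (List Char)) (a b : Nat)
    (hab : a ≤ b) (hb : b ≤ steps.length) :
    pvExtend steps (PySem.Chars.join "\n\n".toList (steps.take a)) (PySem.List.pyRange a b 1)
      = PySem.Chars.join "\n\n".toList (steps.take b) := by
  induction b, hab using Nat.le_induction with
  | base => rw [PySem.List.pyRange_one_eq_nil (by omega)]; rfl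
  | succ b hab ih =>
    have hb' : b < steps.length := by omega
    have hcast : (((b + 1 : Nat)) : Int) = (b : Int) + 1 := by push_cast; ring
    have hrange : PySem.List.pyRange (a : Int) ((b : Int) + 1) 1
        = PySem.List.pyRange (a : Int) (b : Int) 1 ++ [(b : Int)] :=
      PySem.List.pyRange_one_succ_right (by exact_mod_cast hab)
    have htake : steps.take (b + 1) = steps.take b ++ [steps[b]] := by
      rw [List.take_add_one, List.getElem?_eq_getElem hb']; rfl
    rw [hcast, hrange, pvExtend_append, ih (by omega)]
    by_cases hb0 : b = 0
    · subst hb0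
      rw [if_pos (by norm_num)]
      simp [PySem.List.pyGetD_zero, List.getD, List.getElem?_eq_getElem hb', htake,
        PySem.Chars.join_singleton]
    · rw [if_neg (by exact_mod_cast hb0), htake,
        pv_join_append_singleton _ _ _ (by
          intro hnil
          have : (steps.take b).length = 0 := by rw [hnil]; rfl
          rw [List.length_take] at this
          omega)]
      simp [PySem.List.pyGetD_natCast, List.getD, List.getElem?_eq_getElem hb']

-- one step of B's main fold
def pvStep (steps : List (List Char)) (st : List (List Char) × List Char × Int) (cut : Int) :
    List (List Char) × List Char × Int :=
  let p := pvExtend steps st.2.1 (PySem.List.pyRange st.2.2 cut 1)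
  (st.1 ++ [p], p, cut)

-- invariant of B's main fold over any sorted cut list bounded by a … |steps|
theorem pv_fold_inv (steps : List (List Char)) :
    ∀ (cuts : List Int) (a : Nat) (res : List (List Char)),
      a ≤ steps.length →
      (∀ c ∈ cuts, (a : Int) ≤ c ∧ c ≤ steps.length) →
      cuts.Pairwise (· ≤ ·) →
      cuts.foldl (pvStep steps) (res, PySem.Chars.join "\n\n".toList (steps.take a), (a : Int))
        = (res ++ cuts.map (fun c => PySem.Chars.join "\n\n".toList (steps.take c.toNat)),
           PySem.Chars.join "\n\n".toList (steps.take (cuts.getLastD (a : Int)).toNat),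
           cuts.getLastD (a : Int))
  | [], a, res, _, _, _ => by simp
  | c :: cuts, a, res, ha, hmem, hpw => by
    obtain ⟨hac, hcn⟩ := hmem c List.mem_cons_self
    have hc0 : (0 : Int) ≤ c := le_trans (by exact_mod_cast Nat.zero_le a) hac
    have hcast : ((c.toNat : Nat) : Int) = c := Int.toNat_of_nonneg hc0
    have hstep : pvStep steps (res, PySem.Chars.join "\n\n".toList (steps.take a), (a : Int)) c
        = (res ++ [PySem.Chars.join "\n\n".toList (steps.take c.toNat)],
           PySem.Chars.join "\n\n".toList (steps.take c.toNat), c) := by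
      unfold pvStep
      rw [show ((res, PySem.Chars.join "\n\n".toList (steps.take a), (a : Int)).2.2 : Int)
          = (a : Int) from rfl, ← hcast,
        pv_extend_spec steps a c.toNat (by omega) (by omega)]
      simp [hcast]
    have hIH := pv_fold_inv steps cuts c.toNat
      (res ++ [PySem.Chars.join "\n\n".toList (steps.take c.toNat)]) (by omega)
      (fun d hd => ⟨by rw [hcast]; exact (List.rel_of_pairwise_cons hpw hd),
        (hmem d (List.mem_cons_of_mem c hd)).2⟩)
      (List.Pairwise.of_cons hpw)
    rw [hcast] at hIH
    rw [List.foldl_cons, hstep, hIH]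
    rcases cuts with _ | ⟨d, ds⟩
    · simp
    · rcases hgl : (d :: ds).getLast? with _ | x
      · simp at hgl
      · simp [hgl]

-- the cut list of the main loop, for a positive chunk size, is sorted
theorem pv_cuts_sorted (b s : Int) (hs : 0 < s) :
    (PySem.List.pyRange 0 b s).Pairwise (· ≤ ·) := by
  rw [PySem.List.pyRange_of_pos _ _ hs]
  refine List.Pairwise.map _ ?_ (List.pairwise_lt_range (n := _))
  intro k k' hkk'
  have : (k : Int) ≤ (k' : Int) := by exact_mod_cast Nat.le_of_lt hkk'
  nlinarith

-- A's loop body equals the string form of the char-level join of the same prefix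
theorem pv_elem_eq (stepsC : List (List Char)) (c : Int) (hc : 0 ≤ c) :
    PySem.Str.join "\n\n" (PySem.List.slice (stepsC.map String.ofList) none (some c))
      = String.ofList (PySem.Chars.join "\n\n".toList (stepsC.take c.toNat)) := by
  rw [PySem.List.slice_to _ hc, ← List.map_take, PySem.Str.join]
  congr 1
  simp [Function.comp_def]

-- ===== VERDICT (by name: the statement is the Claim_ definition above) =====
theorem split_by_steps_spec : Claim_equal_split_by_steps := by
  intro solution num hdom hpre
  simp only [Spec_split_by_steps, split_by_steps, split_by_steps_alt]
  generalize PySem.Chars.splitOn solution.toList "\n\n".toList = stepsC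
  simp only [PySem.List.len_eq, List.length_map]
  rw [PySem.List.foldl_append_singleton_eq_map]
  -- the cut list is bounded and sorted (empty when num < 0)
  have hmem : ∀ c ∈ PySem.List.pyRange 0 ((stepsC.length : Int) + 1) num,
      (0 : Int) ≤ c ∧ c ≤ (stepsC.length : Int) := by
    intro c hc
    rcases lt_trichotomy num 0 with hneg | hz | hpos
    · rw [PySem.List.pyRange, if_neg hpre] at hc
      simp only [if_neg (not_lt_of_ge (le_of_lt hneg)),
        if_neg (by omega : ¬ ((stepsC.length : Int) + 1 < 0))] at hc
      simp at hc
    · exact absurd hz hpre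
    · have := (PySem.List.mem_pyRange_iff_of_pos hpos c).mp hc
      exact ⟨this.1, by omega⟩
  have hpw : (PySem.List.pyRange 0 ((stepsC.length : Int) + 1) num).Pairwise (· ≤ ·) := by
    rcases lt_trichotomy num 0 with hneg | hz | hpos
    · rw [PySem.List.pyRange, if_neg hpre]
      simp [if_neg (not_lt_of_ge (le_of_lt hneg)),
        if_neg (by omega : ¬ ((stepsC.length : Int) + 1 < 0))]
    · exact absurd hz hpre
    · exact pv_cuts_sorted _ num hpos
  -- B's fold, via the invariant started at prefix = join(steps[:0]) = ""
  have hfold := pv_fold_inv stepsC (PySem.List.pyRange 0 ((stepsC.length : Int) + 1) num) 0 []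
    (Nat.zero_le _) (by intro c hc; simpa using hmem c hc) hpw
  simp only [Nat.cast_zero, List.take_zero, PySem.Chars.join_nil, List.nil_append] at hfold
  have hfun : (fun (st : List (List Char) × List Char × Int) cut =>
      (st.1 ++ [pvExtend stepsC st.2.1 (PySem.List.pyRange st.2.2 cut 1)],
        pvExtend stepsC st.2.1 (PySem.List.pyRange st.2.2 cut 1), cut))
      = pvStep stepsC := by
    funext st cut
    rfl
  rw [hfun, hfold]
  have hlast0 : (0 : Int) ≤ (PySem.List.pyRange 0 ((stepsC.length : Int) + 1) num).getLastD 0 ∧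
      (PySem.List.pyRange 0 ((stepsC.length : Int) + 1) num).getLastD 0 ≤ (stepsC.length : Int) := by
    rcases h : (PySem.List.pyRange 0 ((stepsC.length : Int) + 1) num).getLast? with _ | c
    · rw [List.getLastD_eq_getLast?, h]
      simp only [Option.getD_none]
      exact ⟨le_refl 0, by exact_mod_cast Nat.zero_le stepsC.length⟩
    · rw [List.getLastD_eq_getLast?, h]
      exact hmem c (List.mem_of_getLast? h)
  -- compare the two sides elementwise
  split_ifs with hmod
  · simp only [List.nil_append, List.map_append]
    congr 1
    · rw [List.map_map]
      refine List.map_congr_left ?_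
      intro c hc
      exact pv_elem_eq stepsC c (hmem c hc).1
    · simp only [List.map_cons, List.map_nil]
      congr 1
      rw [show ((PySem.List.pyRange 0 ((stepsC.length : Int) + 1) num).getLastD 0)
            = (((PySem.List.pyRange 0 ((stepsC.length : Int) + 1) num).getLastD 0).toNat : Int) from
          (Int.toNat_of_nonneg hlast0.1).symm]
      simp only [Int.toNat_natCast]
      rw [pv_extend_spec stepsC _ stepsC.length (by
          have h1 := hlast0.1
          have h2 := hlast0.2
          omega) (le_refl stepsC.length),
        List.take_length, PySem.Str.join]
      congr 1
      simp [Function.comp_def]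
  · simp only [List.nil_append, List.map_map]
    refine List.map_congr_left ?_
    intro c hc
    exact pv_elem_eq stepsC c (hmem c hc).1
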